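-- pv_equiv track=rewrite | github.com/MayankkumarTank/Covid-Resources | bot.py | getExceptionMessage
-- ===== SOURCE A (Python) =====
-- def getExceptionMessage(msg):
--     words = msg.split(' ')
--
--     errorMsg = ""
--     for index, word in enumerate(words):
--         if index not in [0,1,2]:
--             errorMsg = errorMsg + ' ' + word
--     errorMsg = errorMsg.rstrip("\'}]")
--     errorMsg = errorMsg.lstrip(" \'")
--
--     return errorMsg
-- ===== SOURCE B (Python) =====
-- def getExceptionMessage(msg):
--     # Scan for the position just after the 3rd space instead of building a word list.
--     start = 0
--     for _ in range(3):
--         pos = msg.find(' ', start)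
--         if pos == -1:
--             return ''
--         start = pos + 1
--     rest = msg[start:]
--     return rest.rstrip("\'}]").lstrip(" \'")
-- ===== Notes on version B (the rewrite author's own statement) =====
-- stated objective: simpler
-- what changed: Instead of splitting the message into a word list and folding over enumerated words filtering out indices 0-2, B scans for the position just after the 3rd space with three find() calls and strips a single slice.
import Mathlib
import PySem

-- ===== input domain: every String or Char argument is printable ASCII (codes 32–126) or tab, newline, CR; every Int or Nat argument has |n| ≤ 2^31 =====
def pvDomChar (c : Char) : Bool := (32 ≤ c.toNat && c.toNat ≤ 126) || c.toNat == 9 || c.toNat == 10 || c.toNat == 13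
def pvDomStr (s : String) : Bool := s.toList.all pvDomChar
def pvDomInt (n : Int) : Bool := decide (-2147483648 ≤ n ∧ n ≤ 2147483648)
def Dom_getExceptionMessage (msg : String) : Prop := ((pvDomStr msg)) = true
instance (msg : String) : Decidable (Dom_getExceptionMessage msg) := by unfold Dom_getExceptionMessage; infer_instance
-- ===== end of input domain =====

-- B replaces A's split-into-words + enumerate/filter fold by three find(' ') scans and one stripped slice (simpler decomposition; same cost).

-- shared helpers: exact ports of Python str.lstrip(chars) / str.rstrip(chars)
-- (drop leading / trailing characters that belong to the set `chars`)
def pyLstripChars (s chars : List Char) : List Char := s.dropWhile (chars.contains ·)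
def pyRstripChars (s chars : List Char) : List Char := (s.reverse.dropWhile (chars.contains ·)).reverse

-- ===== PORT A =====
def getExceptionMessage (msg : String) : String :=
  let words := PySem.Chars.splitOn msg.toList [' ']
  let errorMsg : List Char :=
    (PySem.List.enumerate words).foldl
      (fun acc iw =>
        if ([0, 1, 2] : List Int).contains iw.1 = false then acc ++ ' ' :: iw.2 else acc) []
  let errorMsg := pyRstripChars errorMsg ['\'', '}', ']']
  let errorMsg := pyLstripChars errorMsg [' ', '\'']
  String.mk errorMsg

-- ===== PORT B =====
-- the `for _ in range(3)` loop of Source B, with early return encoded as Option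
def altFindLoop : Nat → List Char → Int → Option Int
  | 0, _, start => some start
  | n + 1, cs, start =>
    let pos := PySem.Chars.findFrom cs [' '] start
    if pos = -1 then none else altFindLoop n cs (pos + 1)

def getExceptionMessage_alt (msg : String) : String :=
  match altFindLoop 3 msg.toList 0 with
  | none => ""
  | some start =>
    let rest := PySem.Chars.slice msg.toList (some start) none
    String.mk (pyLstripChars (pyRstripChars rest ['\'', '}', ']']) [' ', '\''])

-- ===== PRECONDITION & SPEC =====
def Spec_getExceptionMessage (msg : String) (out : String) : Prop := out = getExceptionMessage_alt msg
instance (msg : String) (out : String) : Decidable (Spec_getExceptionMessage msg out) := by unfold Spec_getExceptionMessage; infer_instance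

-- ===== CLAIM (what is proved, stated in full; the proofs are below) =====
def Claim_equal_getExceptionMessage : Prop := ∀ (msg : String), Dom_getExceptionMessage msg → Spec_getExceptionMessage msg (getExceptionMessage msg)

-- ===== LEMMAS AND PROOFS =====

-- clean recursive specification of splitting on a single space
def sp : List Char → List (List Char)
  | [] => [[]]
  | c :: r =>
    if c = ' ' then [] :: sp r
    else
      match sp r with
      | [] => [[c]]
      | w :: ws => (c :: w) :: ws

-- clean recursive specification of find(' ')
def fsp : List Char → Int
  | [] => -1
  | c :: r => if c = ' ' then 0 else if fsp r = -1 then -1 else fsp r + 1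

theorem sp_ne_nil (cs : List Char) : sp cs ≠ [] := by
  cases cs with
  | nil => simp [sp]
  | cons c r =>
    simp only [sp]
    split
    · simp
    · split <;> simp

theorem splitOn_go_sp : ∀ (l : List Char) (fuel : Nat) (cur : List Char) (acc : List (List Char)),
    l.length < fuel →
    PySem.Chars.splitOn.go [' '] fuel l cur acc =
      acc.reverse ++ (match sp l with
        | [] => [cur.reverse]
        | w :: ws => (cur.reverse ++ w) :: ws) := by
  intro l
  induction l with
  | nil =>
    intro fuel cur acc h
    match fuel with
    | f + 1 => simp [PySem.Chars.splitOn.go, sp]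
  | cons c r ih =>
    intro fuel cur acc h
    match fuel with
    | f + 1 =>
      by_cases hc : c = ' '
      · subst hc
        have hpre : ([' '] : List Char).isPrefixOf (' ' :: r) = true := by
          simp [List.isPrefixOf]
        rw [PySem.Chars.splitOn.go]
        simp only [hpre, if_true, List.length_cons, List.length_nil, Nat.zero_add,
          List.drop_succ_cons, List.drop_zero] at *
        rw [ih f [] (cur.reverse :: acc) (by omega)]
        simp only [sp, if_true]
        rcases hspr : sp r with _ | ⟨w, ws⟩
        · exact absurd hspr (sp_ne_nil r)
        · simp
      · have hpre : ([' '] : List Char).isPrefixOf (c :: r) = false := by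
          simp [List.isPrefixOf]
          intro h'; exact absurd h'.symm hc
        rw [PySem.Chars.splitOn.go]
        simp only [hpre, Bool.false_eq_true, if_false, List.length_cons] at *
        rw [ih f (c :: cur) acc (by omega)]
        simp only [sp, hc, if_false]
        rcases hspr : sp r with _ | ⟨w, ws⟩
        · exact absurd hspr (sp_ne_nil r)
        · simp

theorem splitOn_space (cs : List Char) : PySem.Chars.splitOn cs [' '] = sp cs := by
  unfold PySem.Chars.splitOn
  rw [splitOn_go_sp cs (cs.length + 1) [] [] (by omega)]
  rcases h : sp cs with _ | ⟨w, ws⟩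
  · exact absurd h (sp_ne_nil cs)
  · simp

theorem find_go_shift (sub : List Char) (hsub : sub ≠ []) :
    ∀ (l : List Char) (k : Nat),
    PySem.Chars.find.go sub l k =
      if PySem.Chars.find.go sub l 0 = -1 then -1 else k + PySem.Chars.find.go sub l 0 := by
  intro l
  induction l with
  | nil =>
    intro k
    simp [PySem.Chars.find.go, List.isEmpty_iff, hsub]
  | cons c r ih =>
    intro k
    rw [PySem.Chars.find.go, PySem.Chars.find.go]
    by_cases hp : sub.isPrefixOf (c :: r) = true
    · simp [hp]
    · simp only [hp, Bool.false_eq_true, if_false]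
      rw [ih (k + 1), ih 1]
      have hge := PySem.Chars.neg_one_le_find r sub
      rw [show PySem.Chars.find r sub = PySem.Chars.find.go sub r 0 from rfl] at hge
      by_cases h0 : PySem.Chars.find.go sub r 0 = -1
      · simp [h0]
      · have h1 : ¬ (1 + PySem.Chars.find.go sub r 0 = -1) := by omega
        simp only [if_neg h0, Nat.cast_one, if_neg h1]
        push_cast; ring

theorem find_space (cs : List Char) : PySem.Chars.find cs [' '] = fsp cs := by
  induction cs with
  | nil => simp [PySem.Chars.find, PySem.Chars.find.go, fsp]
  | cons c r ih =>
    unfold PySem.Chars.find at *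
    rw [PySem.Chars.find.go]
    by_cases hc : c = ' '
    · subst hc
      have : ([' '] : List Char).isPrefixOf (' ' :: r) = true := by simp [List.isPrefixOf]
      simp [this, fsp]
    · have : ([' '] : List Char).isPrefixOf (c :: r) = false := by
        simp [List.isPrefixOf]; intro h'; exact absurd h'.symm hc
      simp only [this, Bool.false_eq_true, if_false, fsp, hc]
      rw [find_go_shift [' '] (by simp) r 1, ih]
      split <;> simp <;> omega

-- the one structural step both programs share: either no space, or a first space at k
theorem step (cs : List Char) :
    (fsp cs = -1 ∧ sp cs = [cs]) ∨
    (∃ k : Nat, fsp cs = (k : Int) ∧ k + 1 ≤ cs.length ∧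
      sp cs = cs.take k :: sp (cs.drop (k + 1))) := by
  induction cs with
  | nil => left; exact ⟨rfl, rfl⟩
  | cons c r ih =>
    by_cases hc : c = ' '
    · subst hc
      right
      exact ⟨0, by simp [fsp], by simp, by simp [sp]⟩
    · rcases ih with ⟨h1, h2⟩ | ⟨k, h1, h2, h3⟩
      · left
        constructor
        · simp [fsp, hc, h1]
        · simp [sp, hc, h2]
      · right
        have hne : fsp r ≠ -1 := by rw [h1]; omega
        refine ⟨k + 1, ?_, by simp; omega, ?_⟩
        · simp only [fsp, if_neg hc, if_neg hne, h1]
          push_cast; ring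
        · simp [sp, hc, h3]

-- joining the words back: cs = w₀ ⧺ ' '::w₁ ⧺ ' '::w₂ ⧺ …
theorem sp_join : ∀ (cs w : List Char) (ws : List (List Char)),
    sp cs = w :: ws → cs = w ++ ws.flatMap (fun v => ' ' :: v) := by
  intro cs
  induction cs with
  | nil =>
    intro w ws h
    simp only [sp] at h
    injection h with h1 h2
    subst h1; subst h2
    rfl
  | cons c r ih =>
    intro w ws h
    by_cases hc : c = ' '
    · subst hc
      simp only [sp, if_true] at h
      rcases hspr : sp r with _ | ⟨w', ws'⟩
      · exact absurd hspr (sp_ne_nil r)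
      · rw [hspr] at h
        injection h with h1 h2
        subst h1; subst h2
        have := ih w' ws' hspr
        simp [this]
    · simp only [sp, hc, if_false] at h
      rcases hspr : sp r with _ | ⟨w', ws'⟩
      · exact absurd hspr (sp_ne_nil r)
      · rw [hspr] at h
        obtain ⟨h1, h2⟩ := List.cons.inj h
        subst h1; subst h2
        have := ih w' ws' hspr
        simp [this]

-- suffix-level view of B's loop
def sloop : Nat → List Char → Option (List Char)
  | 0, s => some s
  | n + 1, s => if fsp s = -1 then none else sloop n (s.drop ((fsp s).toNat + 1))

theorem sloop_sp : ∀ (n : Nat) (s : List Char),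
    (sloop n s = none → (sp s).length ≤ n) ∧
    (∀ t, sloop n s = some t → sp t = (sp s).drop n) := by
  intro n
  induction n with
  | zero =>
    intro s
    exact ⟨by simp [sloop], fun t h => by simp [sloop] at h; simp [h]⟩
  | succ n ih =>
    intro s
    rcases step s with ⟨h1, h2⟩ | ⟨k, h1, h2, h3⟩
    · constructor
      · intro _; simp [h2]
      · intro t h; simp [sloop, h1] at h
    · have hne : fsp s ≠ -1 := by rw [h1]; omega
      have hun : sloop (n + 1) s = sloop n (s.drop (k + 1)) := by
        simp [sloop, hne, h1]
      constructor
      · intro h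
        rw [hun] at h
        have := (ih (s.drop (k + 1))).1 h
        rw [h3]; simpa using this
      · intro t h
        rw [hun] at h
        have := (ih (s.drop (k + 1))).2 t h
        rw [h3]; simpa using this

theorem altFindLoop_sloop : ∀ (n : Nat) (cs : List Char) (k : Nat), k ≤ cs.length →
    (sloop n (cs.drop k) = none → altFindLoop n cs (k : Int) = none) ∧
    (∀ t, sloop n (cs.drop k) = some t →
      ∃ j : Nat, altFindLoop n cs (k : Int) = some (j : Int) ∧ j ≤ cs.length ∧ cs.drop j = t) := by
  intro n
  induction n with
  | zero =>
    intro cs k hk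
    constructor
    · intro h; simp [sloop] at h
    · intro t h
      simp [sloop] at h
      exact ⟨k, by simp [altFindLoop], hk, h⟩
  | succ n ih =>
    intro cs k hk
    have hff : PySem.Chars.findFrom cs [' '] (k : Int) none =
        if PySem.Chars.find (cs.drop k) [' '] = -1 then -1
        else (k : Int) + PySem.Chars.find (cs.drop k) [' '] :=
      PySem.Chars.findFrom_natCast cs [' '] k hk
    rw [find_space] at hff
    rcases step (cs.drop k) with ⟨h1, _⟩ | ⟨m, h1, h2, _⟩
    · have hffv : PySem.Chars.findFrom cs [' '] (k : Int) none = -1 := by rw [hff, h1]; simp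
      constructor
      · intro _
        simp [altFindLoop, hffv]
      · intro t h
        simp [sloop, h1] at h
    · have hne : fsp (cs.drop k) ≠ -1 := by rw [h1]; omega
      have hffv : PySem.Chars.findFrom cs [' '] (k : Int) none = (k : Int) + m := by
        rw [hff, h1]; simp [hne]
      have hlen : m + 1 ≤ cs.length - k := by simpa using h2
      have hk' : k + m + 1 ≤ cs.length := by omega
      have hcast : ((k : Int) + m) + 1 = ((k + m + 1 : Nat) : Int) := by push_cast; ring
      have hne' : ((k : Int) + m) ≠ -1 := by omega
      have hun : altFindLoop (n + 1) cs (k : Int) = altFindLoop n cs ((k + m + 1 : Nat) : Int) := by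
        simp only [altFindLoop, hffv, hne', if_false, hcast]
      have hdrop : cs.drop (k + m + 1) = (cs.drop k).drop (m + 1) := by
        rw [List.drop_drop]; ring_nf
      have hsl : sloop (n + 1) (cs.drop k) = sloop n (cs.drop (k + m + 1)) := by
        simp [sloop, hne, h1, hdrop]
      constructor
      · intro h
        rw [hsl] at h
        rw [hun]
        exact (ih cs (k + m + 1) hk').1 h
      · intro t h
        rw [hsl] at h
        rw [hun]
        exact (ih cs (k + m + 1) hk').2 t h

-- A's enumerate/filter fold, once past index 2, appends ' '::word for every word
theorem enumerate_nil {α : Type} (i : Int) : PySem.List.enumerate ([] : List α) i = [] := rfl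

theorem enumerate_cons {α : Type} (x : α) (xs : List α) (i : Int) :
    PySem.List.enumerate (x :: xs) i = (i, x) :: PySem.List.enumerate xs (i + 1) := rfl

theorem foldA_tail : ∀ (ws : List (List Char)) (i : Int) (acc : List Char), 3 ≤ i →
    (PySem.List.enumerate ws i).foldl
      (fun acc iw =>
        if ([0, 1, 2] : List Int).contains iw.1 = false then acc ++ ' ' :: iw.2 else acc) acc =
    acc ++ ws.flatMap (fun v => ' ' :: v) := by
  intro ws
  induction ws with
  | nil => intro i acc _; rw [enumerate_nil]; simp
  | cons w ws ih =>
    intro i acc hi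
    have hnot : (([0, 1, 2] : List Int).contains i) = false := by
      simp only [List.contains_cons, List.contains_nil, Bool.or_false, Bool.or_eq_false_iff,
        beq_eq_false_iff_ne, ne_eq]
      omega
    rw [enumerate_cons, List.foldl_cons, hnot, if_pos rfl]
    rw [ih (i + 1) (acc ++ ' ' :: w) (by omega)]
    simp

-- A's whole fold: drop three words, then ' '-prefixed concatenation
theorem foldA_eval (ws : List (List Char)) :
    (PySem.List.enumerate ws 0).foldl
      (fun acc iw =>
        if ([0, 1, 2] : List Int).contains iw.1 = false then acc ++ ' ' :: iw.2 else acc) [] =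
    (ws.drop 3).flatMap (fun v => ' ' :: v) := by
  rcases ws with _ | ⟨w0, _ | ⟨w1, _ | ⟨w2, rest⟩⟩⟩
  · rfl
  · rw [enumerate_cons, List.foldl_cons,
      if_neg (show ¬(([0, 1, 2] : List Int).contains 0 = false) by decide)]
    rfl
  · rw [enumerate_cons, List.foldl_cons,
      if_neg (show ¬(([0, 1, 2] : List Int).contains 0 = false) by decide)]
    rw [enumerate_cons, List.foldl_cons,
      if_neg (show ¬(([0, 1, 2] : List Int).contains (0 + 1) = false) by decide)]
    rfl
  · rw [enumerate_cons, List.foldl_cons,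
      if_neg (show ¬(([0, 1, 2] : List Int).contains 0 = false) by decide)]
    rw [enumerate_cons, List.foldl_cons,
      if_neg (show ¬(([0, 1, 2] : List Int).contains (0 + 1) = false) by decide)]
    rw [enumerate_cons, List.foldl_cons,
      if_neg (show ¬(([0, 1, 2] : List Int).contains (0 + 1 + 1) = false) by decide)]
    rw [foldA_tail rest (0 + 1 + 1 + 1) [] (by norm_num)]
    simp

-- stripping is blind to the ' ' A's fold prepends
theorem strip_space_cons (s : List Char) :
    pyLstripChars (pyRstripChars (' ' :: s) ['\'', '}', ']']) [' ', '\''] =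
    pyLstripChars (pyRstripChars s ['\'', '}', ']']) [' ', '\''] := by
  unfold pyRstripChars pyLstripChars
  rw [show (' ' :: s).reverse = s.reverse ++ [' '] from by simp]
  rw [List.dropWhile_append]
  by_cases h : (List.dropWhile (fun c => (['\'', '}', ']'] : List Char).contains c) s.reverse) = []
  · rw [h, if_pos List.isEmpty_nil]
    decide
  · rw [if_neg (by simpa [List.isEmpty_iff] using h)]
    rw [List.reverse_append]
    rw [show ([' '] : List Char).reverse = [' '] from rfl]
    rw [show ([' '] : List Char) ++ (List.dropWhile (fun c => (['\'', '}', ']'] : List Char).contains c) s.reverse).reverse = ' ' :: (List.dropWhile (fun c => (['\'', '}', ']'] : List Char).contains c) s.reverse).reverse from rfl]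
    rw [List.dropWhile_cons_of_pos (by decide)]

-- slice from a nonnegative start is drop
theorem slice_from_nat (cs : List Char) (j : Nat) :
    PySem.List.slice cs (some (j : Int)) none = cs.drop j := by
  rw [PySem.List.slice_from cs (by positivity)]
  simp

-- ===== VERDICT (by name: the statement is the Claim_ definition above) =====
theorem getExceptionMessage_spec : Claim_equal_getExceptionMessage := by
  intro msg _
  unfold Spec_getExceptionMessage getExceptionMessage getExceptionMessage_alt
  simp only [splitOn_space, foldA_eval]
  have H := altFindLoop_sloop 3 msg.toList 0 (Nat.zero_le _)
  simp only [List.drop_zero, Nat.cast_zero] at H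
  rcases hsl : sloop 3 msg.toList with _ | t
  · have hA : altFindLoop 3 msg.toList 0 = none := H.1 hsl
    have hlen : (sp msg.toList).length ≤ 3 := (sloop_sp 3 msg.toList).1 hsl
    have hd : (sp msg.toList).drop 3 = [] := by
      apply List.drop_eq_nil_of_le; omega
    rw [hA, hd]
    simp [pyRstripChars, pyLstripChars]
    rfl
  · obtain ⟨j, hB, hjle, hdropj⟩ := H.2 t hsl
    have ht : sp t = (sp msg.toList).drop 3 := by
      simpa using (sloop_sp 3 msg.toList).2 t hsl
    rcases hspt : sp t with _ | ⟨v, vs⟩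
    · exact absurd hspt (sp_ne_nil t)
    · have hjoin : t = v ++ vs.flatMap (fun w => ' ' :: w) := sp_join t v vs hspt
      have hAflat : ((sp msg.toList).drop 3).flatMap (fun w => ' ' :: w) = ' ' :: t := by
        rw [← ht, hspt]
        simp [hjoin]
      rw [hAflat, hB]
      show String.mk (pyLstripChars (pyRstripChars (' ' :: t) ['\'', '}', ']']) [' ', '\'']) =
        String.mk (pyLstripChars (pyRstripChars
          (PySem.Chars.slice msg.toList (some ((j : Nat) : Int))) ['\'', '}', ']']) [' ', '\''])
      rw [PySem.Chars.slice_eq_listSlice, slice_from_nat msg.toList j, hdropj]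
      rw [strip_space_cons]
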